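-- pv_equiv track=rewrite | github.com/shahbajsingh/leetcode | aws_processor.py | total_execution_time
-- ===== SOURCE A (Python) =====
-- from math import ceil
-- from typing import List
-- from collections import defaultdict
--
-- def total_execution_time(execution: List[int]) -> int:
--     n = len(execution)
--     total_execution = 0
--
--     # create two copies of execution list
--     exec_orig = execution.copy()
--     exec_curr = execution.copy()
--
--     # map from execution time to indices
--     exec_map = defaultdict(list)
--
--     # iterate through execution list
--     for i, exec_time in enumerate(execution):
--         exec_map[exec_time].append(i)
--
--     for i in range(n):
--         if exec_curr[i] > 0:
--             _ = exec_curr[i] # store original execution time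
--
--             # execute process
--             total_execution += exec_curr[i]
--             exec_curr[i] = 0
--
--             # update cohesive processes
--             for j in exec_map[exec_orig[i]]:
--                 if j != i and exec_curr[j] > 0:
--                     # reduce execution time
--                     exec_curr[j] = ceil(_ / 2)
--
--     return total_execution
-- ===== SOURCE B (Python) =====
-- from typing import List
--
-- def total_execution_time(execution: List[int]) -> int:
--     # one pass: map each original value to its group's current (ceil-halved) chain value
--     total = 0
--     cur = {}
--     for a in execution:
--         if a > 0:
--             v = cur.get(a, a)
--             total += v
--             cur[a] = (v + 1) // 2
--     return total
-- ===== Notes on version B (the rewrite author's own statement) =====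
-- stated objective: faster
-- what changed: Instead of building an index map and, for each executed process, rescanning and rewriting all cohesive indices in a mutable copy, B does a single pass keeping a dict from original value to its group's current ceil-halved chain value.
import Mathlib
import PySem

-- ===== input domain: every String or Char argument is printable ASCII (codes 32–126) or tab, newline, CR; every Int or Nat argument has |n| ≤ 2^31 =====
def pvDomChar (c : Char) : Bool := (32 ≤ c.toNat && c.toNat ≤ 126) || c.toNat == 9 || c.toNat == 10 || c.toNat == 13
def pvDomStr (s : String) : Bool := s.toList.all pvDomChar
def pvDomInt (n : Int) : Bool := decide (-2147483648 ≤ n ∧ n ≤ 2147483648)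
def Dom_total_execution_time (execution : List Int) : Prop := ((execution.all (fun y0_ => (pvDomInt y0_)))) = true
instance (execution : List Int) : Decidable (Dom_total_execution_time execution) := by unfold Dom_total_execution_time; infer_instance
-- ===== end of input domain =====

-- B replaces A's index map + nested index-update loop by a single pass keeping a value → current-chain-value dict.

-- ===== PORT A =====
-- ceil(u / 2) on ints: exact where Python's float halving is exact (covers the |n| ≤ 2^31 domain)
def pvCeilHalf (x : Int) : Int := -(PySem.Int.floordiv (-x) 2)

-- one outer-loop step of A: execute process i, then update its cohesive processes
def pvStepA (exec_map : PySem.Dict Int (List Int)) (exec_orig : List Int)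
    (st : Int × List Int) (i : Int) : Int × List Int :=
  if 0 < PySem.List.pyGetD st.2 i 0 then
    let u := PySem.List.pyGetD st.2 i 0
    let total := st.1 + u
    let ec := PySem.List.pySetD st.2 i 0
    let ec := (exec_map.getD (PySem.List.pyGetD exec_orig i 0) []).foldl
      (fun ec j => if j ≠ i ∧ 0 < PySem.List.pyGetD ec j 0 then PySem.List.pySetD ec j (pvCeilHalf u) else ec) ec
    (total, ec)
  else st

def total_execution_time (execution : List Int) : Int :=
  let n : Int := PySem.List.len execution
  let exec_map : PySem.Dict Int (List Int) :=
    (PySem.List.enumerate execution).foldl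
      (fun d p => d.modify p.2 [] (fun l => l ++ [p.1])) PySem.Dict.empty
  ((PySem.List.pyRange 0 n 1).foldl (pvStepA exec_map execution) (0, execution)).1

-- ===== PORT B =====
def pvStepB (st : Int × PySem.Dict Int Int) (a : Int) : Int × PySem.Dict Int Int :=
  if 0 < a then
    let v := st.2.getD a a
    (st.1 + v, st.2.insert a (PySem.Int.floordiv (v + 1) 2))
  else st

def total_execution_time_alt (execution : List Int) : Int :=
  (execution.foldl pvStepB (0, PySem.Dict.empty)).1

-- ===== PRECONDITION & SPEC =====
def Spec_total_execution_time (execution : List Int) (out : Int) : Prop := out = total_execution_time_alt execution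
instance (execution : List Int) (out : Int) : Decidable (Spec_total_execution_time execution out) := by unfold Spec_total_execution_time; infer_instance

-- ===== CLAIM (what is proved, stated in full; the proofs are below) =====
def Claim_equal_total_execution_time : Prop := ∀ (execution : List Int), Dom_total_execution_time execution → Spec_total_execution_time execution (total_execution_time execution)

-- ===== LEMMAS AND PROOFS =====

theorem pvCeilHalf_eq (u : Int) : pvCeilHalf u = PySem.Int.floordiv (u + 1) 2 := by
  unfold pvCeilHalf
  rw [PySem.Int.floordiv_eq_ediv_of_pos (by omega), PySem.Int.floordiv_eq_ediv_of_pos (by omega)]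
  omega

theorem pvHalf_pos (v : Int) (hv : 0 < v) : 0 < PySem.Int.floordiv (v + 1) 2 := by
  rw [PySem.Int.floordiv_eq_ediv_of_pos (by omega)]
  omega

-- A's exec_map, as a standalone definition (definitionally the fold inside port A)
def pvMap (xs : List Int) : PySem.Dict Int (List Int) :=
  (PySem.List.enumerate xs).foldl (fun d p => d.modify p.2 [] (fun l => l ++ [p.1])) PySem.Dict.empty

theorem pvMap_getD (xs : List Int) (a : Int) :
    (pvMap xs).getD a [] = ((PySem.List.enumerate xs).filter (fun p => p.2 == a)).map (·.1) := by
  unfold pvMap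
  have h := PySem.Dict.getD_foldl_modify_append
    (l := (PySem.List.enumerate xs).map Prod.swap) (d := (PySem.Dict.empty : PySem.Dict Int (List Int))) (c := a)
  rw [List.foldl_map] at h
  simp [Prod.swap] at h
  rw [h]
  simp [List.filter_map, List.map_map, Function.comp_def, Prod.swap]

theorem mem_pvMap_getD (xs : List Int) (a j : Int) :
    j ∈ (pvMap xs).getD a [] ↔ ∃ k : Nat, k < xs.length ∧ j = (k : Int) ∧ xs.getD k 0 = a := by
  rw [pvMap_getD]
  simp only [List.mem_map, List.mem_filter, PySem.List.mem_enumerate_iff]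
  constructor
  · rintro ⟨p, ⟨⟨k, hk, rfl⟩, hval⟩, rfl⟩
    exact ⟨k, hk, by simp, by simp_all [List.getD_eq_getElem?_getD]⟩
  · rintro ⟨k, hk, rfl, hval⟩
    exact ⟨((k : Int), xs[k]), ⟨⟨k, hk, by simp⟩, by simp_all [List.getD_eq_getElem?_getD]⟩, rfl⟩

theorem nodup_pvMap_getD (xs : List Int) (a : Int) : ((pvMap xs).getD a []).Nodup := by
  rw [pvMap_getD]
  have h1 : ((PySem.List.enumerate xs).filter (fun p => p.2 == a)).Pairwise (fun p q => p.1 < q.1) :=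
    (PySem.List.pairwise_lt_enumerate xs 0).sublist List.filter_sublist
  have h2 : (((PySem.List.enumerate xs).filter (fun p => p.2 == a)).map (·.1)).Pairwise (fun x y => (x : Int) < y) :=
    List.Pairwise.map (fun (p : Int × Int) => p.1) (fun _ _ h => h) h1
  exact h2.imp (fun h => ne_of_lt h)

-- the inner 'for j in exec_map[…]' fold: length and pointwise value
theorem pvInner_length (G : List Int) (ec0 : List Int) (i w : Int) :
    (G.foldl (fun ec j => if j ≠ i ∧ 0 < PySem.List.pyGetD ec j 0 then PySem.List.pySetD ec j w else ec) ec0).length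
      = ec0.length := by
  induction G generalizing ec0 with
  | nil => rfl
  | cons j G ih =>
    simp only [List.foldl_cons]
    rw [ih]
    split
    · exact PySem.List.length_pySetD ec0 j w
    · rfl

theorem pvInner_getD (G : List Int) (hG : G.Nodup) (hpos : ∀ j ∈ G, 0 ≤ j)
    (ec0 : List Int) (i w : Int) (m : Nat) (hm : m < ec0.length) :
    (G.foldl (fun ec j => if j ≠ i ∧ 0 < PySem.List.pyGetD ec j 0 then PySem.List.pySetD ec j w else ec) ec0).getD m 0
      = if (m : Int) ∈ G ∧ (m : Int) ≠ i ∧ 0 < ec0.getD m 0 then w else ec0.getD m 0 := by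
  induction G generalizing ec0 with
  | nil => simp
  | cons j G ih =>
    have hj0 : 0 ≤ j := hpos j (by simp)
    have hGN : G.Nodup := hG.of_cons
    have hjG : j ∉ G := (List.nodup_cons.mp hG).1
    simp only [List.foldl_cons]
    set ec1 := if j ≠ i ∧ 0 < PySem.List.pyGetD ec0 j 0 then PySem.List.pySetD ec0 j w else ec0 with hec1
    have hlen1 : ec1.length = ec0.length := by
      rw [hec1]; split
      · exact PySem.List.length_pySetD ec0 j w
      · rfl
    have hgj : PySem.List.pyGetD ec0 j 0 = ec0.getD j.toNat 0 := by
      conv_lhs => rw [show j = (j.toNat : Int) from by omega]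
      rw [PySem.List.pyGetD_natCast]
    have hset : (PySem.List.pySetD ec0 j w).getD m 0 = if (m : Int) = j then w else ec0.getD m 0 := by
      rw [PySem.List.pySetD_of_nonneg ec0 w hj0, List.getD_eq_getElem?_getD, List.getElem?_set]
      by_cases hmj : (m : Int) = j
      · have hjm : j.toNat = m := by omega
        simp [hjm, hm, hmj, List.getD_eq_getElem?_getD]
      · have hjm : j.toNat ≠ m := by omega
        simp [hjm, hmj, List.getD_eq_getElem?_getD]
    have hval : ec1.getD m 0 = if (m : Int) = j ∧ j ≠ i ∧ 0 < ec0.getD m 0 then w else ec0.getD m 0 := by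
      rw [hec1]
      split
      · rename_i hc
        rw [hset]
        by_cases hmj : (m : Int) = j
        · have hjm : j.toNat = m := by omega
          have h0 : 0 < ec0.getD m 0 := by rw [← hjm, ← hgj]; exact hc.2
          rw [List.getD_eq_getElem?_getD] at h0
          simp [hmj, hc.1, h0]
        · simp [hmj]
      · rename_i hc
        rw [not_and_or] at hc
        by_cases hmj : (m : Int) = j
        · rcases hc with hc | hc
          · simp only [ne_eq, not_not] at hc
            simp [hmj, hc]
          · have hjm : j.toNat = m := by omega
            have h0 : ¬ 0 < ec0.getD m 0 := by rw [← hjm, ← hgj]; exact hc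
            rw [List.getD_eq_getElem?_getD] at h0
            simp [h0]
        · simp [hmj]
    rw [ih hGN (fun x hx => hpos x (by simp [hx])) ec1 (by omega)]
    by_cases hmG : (m : Int) ∈ G
    · have hmj : (m : Int) ≠ j := fun h => hjG (h ▸ hmG)
      have he : ec1.getD m 0 = ec0.getD m 0 := by rw [hval]; simp [hmj]
      rw [he]
      simp [hmG, hmj]
    · rw [hval]
      by_cases hmj : (m : Int) = j
      · by_cases hji : j ≠ i
        · by_cases h0 : 0 < ec0.getD m 0
          · rw [List.getD_eq_getElem?_getD] at h0
            simp [hmG, hmj, hji, h0]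
          · rw [List.getD_eq_getElem?_getD] at h0
            simp [hmG, hmj, h0]
        · simp only [ne_eq, not_not] at hji
          simp [hmG, hmj, hji]
      · simp [hmG, hmj]

theorem pvSet_getD (xs : List Int) (n m : Nat) (v : Int) (hn : n < xs.length) :
    (xs.set n v).getD m 0 = if n = m then v else xs.getD m 0 := by
  rw [List.getD_eq_getElem?_getD, List.getElem?_set]
  by_cases h : n = m
  · simp [h, h ▸ hn]
  · simp [h, List.getD_eq_getElem?_getD]

-- joint invariant after k outer steps of A / the first k elements of B:
-- equal totals, and exec_curr at a pending index j holds its group's current chain value (B's dict entry)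
theorem pv_invariant (xs : List Int) : ∀ (k : Nat), k ≤ xs.length →
    (((PySem.List.pyRange 0 k 1).foldl (pvStepA (pvMap xs) xs) (0, xs)).1
        = ((xs.take k).foldl pvStepB (0, PySem.Dict.empty)).1)
    ∧ (((PySem.List.pyRange 0 k 1).foldl (pvStepA (pvMap xs) xs) (0, xs)).2.length = xs.length)
    ∧ (∀ j : Nat, j < k →
        ((PySem.List.pyRange 0 k 1).foldl (pvStepA (pvMap xs) xs) (0, xs)).2.getD j 0 ≤ 0)
    ∧ (∀ j : Nat, k ≤ j → j < xs.length →
        ((PySem.List.pyRange 0 k 1).foldl (pvStepA (pvMap xs) xs) (0, xs)).2.getD j 0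
          = (if 0 < xs.getD j 0 then
              ((xs.take k).foldl pvStepB (0, PySem.Dict.empty)).2.getD (xs.getD j 0) (xs.getD j 0)
            else xs.getD j 0))
    ∧ (∀ a : Int, 0 < a →
        0 < ((xs.take k).foldl pvStepB (0, PySem.Dict.empty)).2.getD a a) := by
  intro k
  induction k with
  | zero =>
    intro _
    refine ⟨rfl, rfl, by omega, ?_, ?_⟩
    · intro j _ _
      simp [PySem.Dict.getD_empty]
    · intro a ha
      simpa [PySem.Dict.getD_empty] using ha
  | succ k ih =>
    intro hk1
    have hklen : k < xs.length := by omega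
    obtain ⟨h1, h2, h3, h4, h5⟩ := ih (by omega)
    have hrange : PySem.List.pyRange 0 ((k + 1 : Nat) : Int) 1
        = PySem.List.pyRange 0 (k : Nat) 1 ++ [(k : Int)] := by
      push_cast
      exact PySem.List.pyRange_one_succ_right (by omega : (0:Int) ≤ (k:Int))
    have htake : xs.take (k + 1) = xs.take k ++ [xs.getD k 0] := by
      rw [List.take_succ, List.getElem?_eq_getElem hklen]
      simp [List.getD_eq_getElem?_getD, List.getElem?_eq_getElem hklen]
    rw [hrange, htake, List.foldl_append, List.foldl_append]
    simp only [List.foldl_cons, List.foldl_nil]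
    set A := (PySem.List.pyRange 0 (k : Nat) 1).foldl (pvStepA (pvMap xs) xs) (0, xs) with hA
    set B := (xs.take k).foldl pvStepB (0, PySem.Dict.empty) with hB
    set a := xs.getD k 0 with haa
    have hAk : A.2.getD k 0 = if 0 < a then B.2.getD a a else a := h4 k le_rfl hklen
    by_cases ha : 0 < a
    · -- executed step
      set v := B.2.getD a a with hv
      have hvpos : 0 < v := h5 a ha
      have hAkv : A.2.getD k 0 = v := by rw [hAk, if_pos ha]
      have hstepB : pvStepB B a = (B.1 + v, B.2.insert a (PySem.Int.floordiv (v + 1) 2)) := by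
        rw [pvStepB, if_pos ha]
      set G := (pvMap xs).getD a [] with hG
      set w := pvCeilHalf v with hw
      set ec0 := PySem.List.pySetD A.2 (k : Int) 0 with hec0
      have hec0' : ec0 = A.2.set k 0 := PySem.List.pySetD_natCast A.2 k 0
      have hec0len : ec0.length = xs.length := by rw [hec0']; simp [h2]
      have hstepA : pvStepA (pvMap xs) xs A (k : Int)
          = (A.1 + v, G.foldl
              (fun ec j => if j ≠ (k : Int) ∧ 0 < PySem.List.pyGetD ec j 0 then PySem.List.pySetD ec j w else ec) ec0) := by
        rw [pvStepA]
        simp only [PySem.List.pyGetD_natCast, hAkv, ← haa, if_pos hvpos]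
        rfl
      have hGnodup : G.Nodup := nodup_pvMap_getD xs a
      have hGpos : ∀ j ∈ G, 0 ≤ j := by
        intro j hj
        obtain ⟨k', _, rfl, _⟩ := (mem_pvMap_getD xs a j).mp hj
        positivity
      have hinner : ∀ m : Nat, m < xs.length →
          (G.foldl (fun ec j => if j ≠ (k : Int) ∧ 0 < PySem.List.pyGetD ec j 0 then PySem.List.pySetD ec j w else ec) ec0).getD m 0
            = if (m : Int) ∈ G ∧ (m : Int) ≠ (k : Int) ∧ 0 < ec0.getD m 0 then w else ec0.getD m 0 := by
        intro m hm
        exact pvInner_getD G hGnodup hGpos ec0 (k : Int) w m (by omega)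
      have hec0getD : ∀ m : Nat, ec0.getD m 0 = if k = m then 0 else A.2.getD m 0 := by
        intro m
        rw [hec0']
        exact pvSet_getD A.2 k m 0 (by omega)
      rw [hstepA, hstepB]
      refine ⟨by simp [h1], ?_, ?_, ?_, ?_⟩
      · simpa [pvInner_length, hec0'] using h2
      · -- executed prefix stays ≤ 0
        intro j hj
        rw [hinner j (by omega)]
        by_cases hjk : j = k
        · subst hjk
          rw [hec0getD j]
          simp
        · have hjlt : j < k := by omega
          have : ec0.getD j 0 = A.2.getD j 0 := by rw [hec0getD j]; simp [(show k ≠ j by omega)]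
          rw [this]
          have hle := h3 j hjlt
          simp only [not_lt.mpr hle, and_false, if_false]
          exact hle
      · -- pending indices hold their group's chain value
        intro j hj1 hj2
        rw [hinner j hj2]
        have hkj : k ≠ j := by omega
        have he : ec0.getD j 0 = A.2.getD j 0 := by rw [hec0getD j]; simp [hkj]
        have hAj := h4 j (by omega) hj2
        set b := xs.getD j 0 with hbb
        by_cases hb : b = a
        · have hbpos : 0 < b := hb ▸ ha
          have hmem : (j : Int) ∈ G := (mem_pvMap_getD xs a j).mpr ⟨j, hj2, rfl, hb⟩
          have hval : ec0.getD j 0 = v := by rw [he, hAj, if_pos hbpos, hb]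
          rw [if_pos ⟨hmem, by exact_mod_cast (by omega : (j:Int) ≠ k), by rw [hval]; exact hvpos⟩]
          rw [if_pos hbpos, hb, PySem.Dict.getD_insert_self]
          exact (pvCeilHalf_eq v)
        · have hnmem : (j : Int) ∉ G := by
            intro hmemj
            obtain ⟨k', _, hk', hval'⟩ := (mem_pvMap_getD xs a (j : Int)).mp hmemj
            have : k' = j := by exact_mod_cast hk'.symm
            exact hb (by rw [hbb, ← this]; exact hval')
          rw [if_neg (by tauto), he, hAj]
          by_cases hbpos : 0 < b
          · rw [if_pos hbpos, if_pos hbpos, PySem.Dict.getD_insert, if_neg hb]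
          · rw [if_neg hbpos, if_neg hbpos]
      · -- B's dict holds positive chain values at positive keys
        intro c hc
        rw [PySem.Dict.getD_insert]
        by_cases hca : c = a
        · rw [if_pos hca]
          exact pvHalf_pos v hvpos
        · rw [if_neg hca]
          exact h5 c hc
    · -- skipped step (non-positive value)
      have hAka : A.2.getD k 0 = a := by rw [hAk, if_neg ha]
      have hstepA : pvStepA (pvMap xs) xs A (k : Int) = A := by
        rw [pvStepA]
        simp only [PySem.List.pyGetD_natCast, hAka]
        rw [if_neg (by simpa using ha)]
      have hstepB : pvStepB B a = B := by rw [pvStepB, if_neg ha]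
      rw [hstepA, hstepB]
      refine ⟨h1, h2, ?_, ?_, h5⟩
      · intro j hj
        by_cases hjk : j = k
        · subst hjk
          rw [hAka]; omega
        · exact h3 j (by omega)
      · intro j hj1 hj2
        exact h4 j (by omega) hj2

-- ===== VERDICT (by name: the statement is the Claim_ definition above) =====
theorem total_execution_time_spec : Claim_equal_total_execution_time := by
  intro xs _
  unfold Spec_total_execution_time total_execution_time total_execution_time_alt
  have h := (pv_invariant xs xs.length le_rfl).1
  simpa [pvMap, PySem.List.len] using h
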